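-- pv_equiv track=rewrite | github.com/DwitikrushnaDash/python | practice/recurrsion.py | find_all_2
-- ===== SOURCE A (Python) =====
-- def find_all_2(arr,target, indx=0):
--     res = []
--     if indx == len(arr):
--         return res
--     if arr[indx] == target:
--         res.append(indx)
--     tmp_arr = find_all_2(arr, target, indx+1)
--     tmp_arr.extend(res)
--     return tmp_arr
-- ===== SOURCE B (Python) =====
-- def find_all_2(arr, target, indx=0):
--     return [i for i in range(len(arr) - 1, indx - 1, -1) if arr[i] == target]
-- ===== Notes on version B (the rewrite author's own statement) =====
-- stated objective: simpler
-- what changed: Replaces the recursion (which builds the result on the unwind) with a single reverse-scan list comprehension over range(len(arr)-1, indx-1, -1); no recursion, no list extension.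
import Mathlib
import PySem

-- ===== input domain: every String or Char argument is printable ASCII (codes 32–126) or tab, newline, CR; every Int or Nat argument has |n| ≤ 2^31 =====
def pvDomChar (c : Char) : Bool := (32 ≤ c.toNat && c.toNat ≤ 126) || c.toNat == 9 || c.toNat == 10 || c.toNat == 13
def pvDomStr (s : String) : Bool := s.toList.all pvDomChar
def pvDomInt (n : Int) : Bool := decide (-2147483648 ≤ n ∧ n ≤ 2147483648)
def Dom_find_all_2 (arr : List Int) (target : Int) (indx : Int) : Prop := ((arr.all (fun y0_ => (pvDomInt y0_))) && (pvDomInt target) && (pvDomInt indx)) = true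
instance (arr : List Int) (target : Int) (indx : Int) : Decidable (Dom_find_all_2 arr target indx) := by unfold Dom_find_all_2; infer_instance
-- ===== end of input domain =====

-- B replaces A's recursion (result assembled on the unwind) by a single reverse-scan
-- comprehension over range(len(arr)-1, indx-1, -1); same return value on Pre_.

-- ===== PORT A =====
-- literal port of the recursion; the 'none' branch is where Python raises IndexError (outside Pre_)
def find_all_2 (arr : List Int) (target : Int) (indx : Int) : List Int :=
  if indx = arr.length then []
  else
    match h : PySem.List.pyGet? arr indx with
    | none => []   -- Python raises IndexError here; excluded by Pre_
    | some v =>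
      let res : List Int := if v = target then [indx] else []
      let tmp_arr := find_all_2 arr target (indx + 1)
      tmp_arr ++ res
termination_by ((arr.length : Int) - indx).toNat
decreasing_by
  have : ¬ (PySem.List.pyGet? arr indx = none) := by simp [h]
  rw [PySem.List.pyGet?_eq_none_iff] at this
  have hin : PySem.Raise.InRange arr.length indx := not_not.mp this
  unfold PySem.Raise.InRange at hin
  omega

-- ===== PORT B =====
def find_all_2_alt (arr : List Int) (target : Int) (indx : Int) : List Int :=
  (PySem.List.pyRange ((arr.length : Int) - 1) (indx - 1) (-1)).filter
    (fun i => PySem.List.pyGet? arr i == some target)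

-- ===== PRECONDITION & SPEC =====
-- Pre_ excludes exactly the inputs where Python A raises: indx outside [-len(arr), len(arr)].
def Pre_find_all_2 (arr : List Int) (target : Int) (indx : Int) : Prop :=
  -(arr.length : Int) ≤ indx ∧ indx ≤ (arr.length : Int)
instance (arr : List Int) (target : Int) (indx : Int) : Decidable (Pre_find_all_2 arr target indx) := by unfold Pre_find_all_2; infer_instance
def pvWitness_find_all_2 : List Int × Int × Int := ([1, 2, 1, 3], 1, 0)

def Spec_find_all_2 (arr : List Int) (target : Int) (indx : Int) (out : List Int) : Prop := out = find_all_2_alt arr target indx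
instance (arr : List Int) (target : Int) (indx : Int) (out : List Int) : Decidable (Spec_find_all_2 arr target indx out) := by unfold Spec_find_all_2; infer_instance

-- ===== CLAIM (what is proved, stated in full; the proofs are below) =====
def Claim_equal_find_all_2 : Prop := ∀ (arr : List Int) (target : Int) (indx : Int), Dom_find_all_2 arr target indx → Pre_find_all_2 arr target indx → Spec_find_all_2 arr target indx (find_all_2 arr target indx)

-- ===== LEMMAS AND PROOFS =====

-- the key invariant: on in-range indx, A's recursion computes B's reverse-scan filter
theorem find_all_2_eq_alt (arr : List Int) (target : Int) (indx : Int)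
    (hlo : -(arr.length : Int) ≤ indx) (hhi : indx ≤ (arr.length : Int)) :
    find_all_2 arr target indx = find_all_2_alt arr target indx := by
  by_cases heq : indx = (arr.length : Int)
  · subst heq
    rw [find_all_2, find_all_2_alt]
    rw [PySem.List.pyRange_neg_one_eq_nil (by omega)]
    simp
  · have hlt : indx < (arr.length : Int) := lt_of_le_of_ne hhi heq
    rw [find_all_2]
    have hne : ¬ (indx = (arr.length : Int)) := heq
    rw [if_neg (by exact_mod_cast hne)]
    have hin : PySem.Raise.InRange arr.length indx := by
      unfold PySem.Raise.InRange; omega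
    obtain ⟨v, hv⟩ : ∃ v, PySem.List.pyGet? arr indx = some v := by
      cases hg : PySem.List.pyGet? arr indx with
      | none => exact absurd ((PySem.List.pyGet?_eq_none_iff _ _).mp hg) (not_not.mpr hin)
      | some v => exact ⟨v, rfl⟩
    rw [hv]
    have ih := find_all_2_eq_alt arr target (indx + 1) (by omega) (by omega)
    rw [ih]
    unfold find_all_2_alt
    rw [PySem.List.pyRange_neg_one_eq_reverse, PySem.List.pyRange_neg_one_eq_reverse]
    have h1 : indx - 1 + 1 = indx := by ring
    have h2 : (arr.length : Int) - 1 + 1 = (arr.length : Int) := by ring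
    rw [h1, h2]
    rw [PySem.List.pyRange_one_cons hlt]
    simp only [List.reverse_cons, List.filter_append, List.filter_cons, List.filter_nil]
    rw [hv]
    by_cases hvt : v = target
    · simp [hvt]
    · simp [hvt, Ne.symm]
termination_by ((arr.length : Int) - indx).toNat
decreasing_by omega

-- ===== VERDICT (by name: the statement is the Claim_ definition above) =====
theorem find_all_2_spec : Claim_equal_find_all_2 := by
  intro arr target indx _ hpre
  exact find_all_2_eq_alt arr target indx hpre.1 hpre.2
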